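-- pv_equiv track=rewrite | github.com/thimaianhphan/travel_marvel | alternative_poi/similarity/category.py | matching_buckets
-- ===== SOURCE A (Python) =====
-- from typing import List
--
-- CATEGORY_EQUIV = {
--     "lake": {"lake","lagoon","reservoir","pond","fjord","glacial_lake","crater_lake"},
--     "waterfall": {"waterfall","cascade"},
--     "beach": {"beach","bay","shore","coastline"},
--     "viewpoint": {"viewpoint","peak","summit","overlook","cliff"},
--     "park": {"park","protected_area","nature_reserve"},
--     "castle": {"castle","fortress"},
--     "church": {"church","cathedral","basilica","monastery"},
--     "museum": {"museum"},
--     "unknown": {"unknown"},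
-- }
--
-- def matching_buckets(qcat: str) -> List[str]:
--     q = (qcat or "unknown").lower()
--     allowed = CATEGORY_EQUIV.get(q, {q})
--     cats = []
--     for coarse, members in CATEGORY_EQUIV.items():
--         if (coarse in allowed) or (len(members.intersection(allowed)) > 0):
--             cats.append(coarse)
--     return cats
-- ===== SOURCE B (Python) =====
-- from typing import List
--
-- CATEGORY_EQUIV = {
--     "lake": {"lake","lagoon","reservoir","pond","fjord","glacial_lake","crater_lake"},
--     "waterfall": {"waterfall","cascade"},
--     "beach": {"beach","bay","shore","coastline"},
--     "viewpoint": {"viewpoint","peak","summit","overlook","cliff"},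
--     "park": {"park","protected_area","nature_reserve"},
--     "castle": {"castle","fortress"},
--     "church": {"church","cathedral","basilica","monastery"},
--     "museum": {"museum"},
--     "unknown": {"unknown"},
-- }
--
-- # Reverse index built once: member -> its (unique, since buckets are disjoint) coarse bucket.
-- MEMBER_TO_BUCKET = {m: coarse for coarse, members in CATEGORY_EQUIV.items() for m in members}
--
-- def matching_buckets(qcat: str) -> List[str]:
--     q = (qcat or "unknown").lower()
--     b = MEMBER_TO_BUCKET.get(q)
--     return [] if b is None else [b]
-- ===== Notes on version B (the rewrite author's own statement) =====
-- stated objective: simpler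
-- what changed: Replaces A's per-query scan over all 9 buckets (set membership plus set intersection per bucket) with a single lookup in a reverse index member->bucket built once at module level; correct because the buckets are pairwise disjoint, so A always returns 0 or 1 bucket.
import Mathlib
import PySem

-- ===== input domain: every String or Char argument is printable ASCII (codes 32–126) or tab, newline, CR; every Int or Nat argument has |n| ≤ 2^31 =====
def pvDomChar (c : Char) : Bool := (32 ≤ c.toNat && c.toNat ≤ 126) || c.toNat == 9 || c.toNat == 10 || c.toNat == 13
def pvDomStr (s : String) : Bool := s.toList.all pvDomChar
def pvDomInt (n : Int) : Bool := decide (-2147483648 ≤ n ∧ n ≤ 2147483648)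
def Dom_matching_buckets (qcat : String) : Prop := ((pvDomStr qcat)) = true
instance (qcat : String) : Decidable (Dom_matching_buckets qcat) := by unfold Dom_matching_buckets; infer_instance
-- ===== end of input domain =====

-- B replaces A's scan over all buckets (set membership + intersection per bucket) by a single
-- lookup in a reverse index member -> bucket, built once; objective: simpler.

-- ===== PORT A =====
def CATEGORY_EQUIV : PySem.Dict String (PySem.Set String) := PySem.Dict.ofList [
  ("lake", PySem.Set.ofList ["lake","lagoon","reservoir","pond","fjord","glacial_lake","crater_lake"]),
  ("waterfall", PySem.Set.ofList ["waterfall","cascade"]),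
  ("beach", PySem.Set.ofList ["beach","bay","shore","coastline"]),
  ("viewpoint", PySem.Set.ofList ["viewpoint","peak","summit","overlook","cliff"]),
  ("park", PySem.Set.ofList ["park","protected_area","nature_reserve"]),
  ("castle", PySem.Set.ofList ["castle","fortress"]),
  ("church", PySem.Set.ofList ["church","cathedral","basilica","monastery"]),
  ("museum", PySem.Set.ofList ["museum"]),
  ("unknown", PySem.Set.ofList ["unknown"])]

def matching_buckets (qcat : String) : List String :=
  let q := PySem.Str.lower (if qcat = "" then "unknown" else qcat)
  let allowed := (CATEGORY_EQUIV.get? q).getD (PySem.Set.ofList [q])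
  CATEGORY_EQUIV.items.foldl
    (fun cats cm =>
      if PySem.Set.contains allowed cm.1 || decide (0 < PySem.Set.len (PySem.Set.inter cm.2 allowed)) then
        cats ++ [cm.1]
      else cats) []

-- ===== PORT B =====
-- MEMBER_TO_BUCKET = {m: coarse for coarse, members in CATEGORY_EQUIV.items() for m in members}
def MEMBER_TO_BUCKET : PySem.Dict String String :=
  CATEGORY_EQUIV.items.foldl
    (fun d cm => cm.2.foldl (fun d m => d.insert m cm.1) d) PySem.Dict.empty

def matching_buckets_alt (qcat : String) : List String :=
  let q := PySem.Str.lower (if qcat = "" then "unknown" else qcat)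
  match MEMBER_TO_BUCKET.get? q with
  | none => []
  | some b => [b]

-- ===== PRECONDITION & SPEC =====
def Spec_matching_buckets (qcat : String) (out : List String) : Prop := out = matching_buckets_alt qcat
instance (qcat : String) (out : List String) : Decidable (Spec_matching_buckets qcat out) := by unfold Spec_matching_buckets; infer_instance

-- ===== CLAIM (what is proved, stated in full; the proofs are below) =====
def Claim_equal_matching_buckets : Prop := ∀ (qcat : String), Dom_matching_buckets qcat → Spec_matching_buckets qcat (matching_buckets qcat)

-- ===== LEMMAS AND PROOFS =====
-- CATEGORY_EQUIV / MEMBER_TO_BUCKET evaluated to literal association lists (proof-side only)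
theorem pvCE_lit : CATEGORY_EQUIV = PySem.Dict.mk [
  ("lake", ["lake","lagoon","reservoir","pond","fjord","glacial_lake","crater_lake"]),
  ("waterfall", ["waterfall","cascade"]),
  ("beach", ["beach","bay","shore","coastline"]),
  ("viewpoint", ["viewpoint","peak","summit","overlook","cliff"]),
  ("park", ["park","protected_area","nature_reserve"]),
  ("castle", ["castle","fortress"]),
  ("church", ["church","cathedral","basilica","monastery"]),
  ("museum", ["museum"]),
  ("unknown", ["unknown"])] := by decide

theorem pvM_lit : MEMBER_TO_BUCKET = PySem.Dict.mk [("lake", "lake"), ("lagoon", "lake"), ("reservoir", "lake"), ("pond", "lake"), ("fjord", "lake"), ("glacial_lake", "lake"), ("crater_lake", "lake"), ("waterfall", "waterfall"), ("cascade", "waterfall"), ("beach", "beach"), ("bay", "beach"), ("shore", "beach"), ("coastline", "beach"), ("viewpoint", "viewpoint"), ("peak", "viewpoint"), ("summit", "viewpoint"), ("overlook", "viewpoint"), ("cliff", "viewpoint"), ("park", "park"), ("protected_area", "park"), ("nature_reserve", "park"), ("castle", "castle"), ("fortress", "castle"), ("church", "church"), ("cathedral", "church"), ("basilica", "church"), ("monastery",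 "church"), ("museum", "museum"), ("unknown", "unknown")] := by decide

-- the shared core of both ports, as a function of the normalised query q
def pvCoreA (q : String) : List String :=
  (CATEGORY_EQUIV.get? q).getD (PySem.Set.ofList [q]) |> fun allowed =>
    CATEGORY_EQUIV.items.foldl
      (fun cats cm =>
        if PySem.Set.contains allowed cm.1 || decide (0 < PySem.Set.len (PySem.Set.inter cm.2 allowed)) then
          cats ++ [cm.1]
        else cats) []

def pvCoreB (q : String) : List String :=
  match MEMBER_TO_BUCKET.get? q with
  | none => []
  | some b => [b]

-- q is none of the member strings: A's scan appends nothing and B's lookup misses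
theorem pv_core_eq_of_notMem (q : String) (h1 : q ≠ "lake") (h2 : q ≠ "lagoon") (h3 : q ≠ "reservoir") (h4 : q ≠ "pond") (h5 : q ≠ "fjord") (h6 : q ≠ "glacial_lake") (h7 : q ≠ "crater_lake") (h8 : q ≠ "waterfall") (h9 : q ≠ "cascade") (h10 : q ≠ "beach") (h11 : q ≠ "bay") (h12 : q ≠ "shore") (h13 : q ≠ "coastline") (h14 : q ≠ "viewpoint") (h15 : q ≠ "peak") (h16 : q ≠ "summit") (h17 : q ≠ "overlook") (h18 : q ≠ "cliff") (h19 : q ≠ "park") (h20 : q ≠ "protected_area") (h21 : q ≠ "nature_reserve") (h22 : q ≠ "castle") (h23 : q ≠ "fortress") (h24 : q ≠ "church") (h25 : q ≠ "cathedral") (h26 : q ≠ "basilica") (h27 : q ≠ "monastery") (h28 : q ≠ "museum") (h29 : q ≠ "unknown") :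
    pvCoreA q = pvCoreB q := by
  unfold pvCoreA pvCoreB
  rw [pvM_lit, pvCE_lit]
  simp [PySem.Dict.get?, PySem.Dict.items, List.find?, PySem.Set.contains, PySem.Set.inter,
      PySem.Set.len, PySem.Set.ofList, PySem.Set.add, List.foldl, List.filter,
      (show ("lake" == q) = false from by simpa using (Ne.symm h1)),
      (show (q == "lake") = false from by simpa using h1),
      h1,
      Ne.symm h1,
      (show ("lagoon" == q) = false from by simpa using (Ne.symm h2)),
      (show (q == "lagoon") = false from by simpa using h2),
      h2,
      Ne.symm h2,
      (show ("reservoir" == q) = false from by simpa using (Ne.symm h3)),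
      (show (q == "reservoir") = false from by simpa using h3),
      h3,
      Ne.symm h3,
      (show ("pond" == q) = false from by simpa using (Ne.symm h4)),
      (show (q == "pond") = false from by simpa using h4),
      h4,
      Ne.symm h4,
      (show ("fjord" == q) = false from by simpa using (Ne.symm h5)),
      (show (q == "fjord") = false from by simpa using h5),
      h5,
      Ne.symm h5,
      (show ("glacial_lake" == q) = false from by simpa using (Ne.symm h6)),
      (show (q == "glacial_lake") = false from by simpa using h6),
      h6,
      Ne.symm h6,
      (show ("crater_lake" == q) = false from by simpa using (Ne.symm h7)),
      (show (q == "crater_lake") = false from by simpa using h7),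
      h7,
      Ne.symm h7,
      (show ("waterfall" == q) = false from by simpa using (Ne.symm h8)),
      (show (q == "waterfall") = false from by simpa using h8),
      h8,
      Ne.symm h8,
      (show ("cascade" == q) = false from by simpa using (Ne.symm h9)),
      (show (q == "cascade") = false from by simpa using h9),
      h9,
      Ne.symm h9,
      (show ("beach" == q) = false from by simpa using (Ne.symm h10)),
      (show (q == "beach") = false from by simpa using h10),
      h10,
      Ne.symm h10,
      (show ("bay" == q) = false from by simpa using (Ne.symm h11)),
      (show (q == "bay") = false from by simpa using h11),
      h11,
      Ne.symm h11,
      (show ("shore" == q) = false from by simpa using (Ne.symm h12)),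
      (show (q == "shore") = false from by simpa using h12),
      h12,
      Ne.symm h12,
      (show ("coastline" == q) = false from by simpa using (Ne.symm h13)),
      (show (q == "coastline") = false from by simpa using h13),
      h13,
      Ne.symm h13,
      (show ("viewpoint" == q) = false from by simpa using (Ne.symm h14)),
      (show (q == "viewpoint") = false from by simpa using h14),
      h14,
      Ne.symm h14,
      (show ("peak" == q) = false from by simpa using (Ne.symm h15)),
      (show (q == "peak") = false from by simpa using h15),
      h15,
      Ne.symm h15,
      (show ("summit" == q) = false from by simpa using (Ne.symm h16)),
      (show (q == "summit") = false from by simpa using h16),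
      h16,
      Ne.symm h16,
      (show ("overlook" == q) = false from by simpa using (Ne.symm h17)),
      (show (q == "overlook") = false from by simpa using h17),
      h17,
      Ne.symm h17,
      (show ("cliff" == q) = false from by simpa using (Ne.symm h18)),
      (show (q == "cliff") = false from by simpa using h18),
      h18,
      Ne.symm h18,
      (show ("park" == q) = false from by simpa using (Ne.symm h19)),
      (show (q == "park") = false from by simpa using h19),
      h19,
      Ne.symm h19,
      (show ("protected_area" == q) = false from by simpa using (Ne.symm h20)),
      (show (q == "protected_area") = false from by simpa using h20),
      h20,
      Ne.symm h20,
      (show ("nature_reserve" == q) = false from by simpa using (Ne.symm h21)),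
      (show (q == "nature_reserve") = false from by simpa using h21),
      h21,
      Ne.symm h21,
      (show ("castle" == q) = false from by simpa using (Ne.symm h22)),
      (show (q == "castle") = false from by simpa using h22),
      h22,
      Ne.symm h22,
      (show ("fortress" == q) = false from by simpa using (Ne.symm h23)),
      (show (q == "fortress") = false from by simpa using h23),
      h23,
      Ne.symm h23,
      (show ("church" == q) = false from by simpa using (Ne.symm h24)),
      (show (q == "church") = false from by simpa using h24),
      h24,
      Ne.symm h24,
      (show ("cathedral" == q) = false from by simpa using (Ne.symm h25)),
      (show (q == "cathedral") = false from by simpa using h25),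
      h25,
      Ne.symm h25,
      (show ("basilica" == q) = false from by simpa using (Ne.symm h26)),
      (show (q == "basilica") = false from by simpa using h26),
      h26,
      Ne.symm h26,
      (show ("monastery" == q) = false from by simpa using (Ne.symm h27)),
      (show (q == "monastery") = false from by simpa using h27),
      h27,
      Ne.symm h27,
      (show ("museum" == q) = false from by simpa using (Ne.symm h28)),
      (show (q == "museum") = false from by simpa using h28),
      h28,
      Ne.symm h28,
      (show ("unknown" == q) = false from by simpa using (Ne.symm h29)),
      (show (q == "unknown") = false from by simpa using h29),
      h29,
      Ne.symm h29]

set_option maxHeartbeats 2000000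
-- both ports agree at every normalised query
theorem pv_core_eq (q : String) : pvCoreA q = pvCoreB q := by
  by_cases hq : q = "lake" ∨ q = "lagoon" ∨ q = "reservoir" ∨ q = "pond" ∨ q = "fjord" ∨ q = "glacial_lake" ∨ q = "crater_lake" ∨ q = "waterfall" ∨ q = "cascade" ∨ q = "beach" ∨ q = "bay" ∨ q = "shore" ∨ q = "coastline" ∨ q = "viewpoint" ∨ q = "peak" ∨ q = "summit" ∨ q = "overlook" ∨ q = "cliff" ∨ q = "park" ∨ q = "protected_area" ∨ q = "nature_reserve" ∨ q = "castle" ∨ q = "fortress" ∨ q = "church" ∨ q = "cathedral" ∨ q = "basilica" ∨ q = "monastery" ∨ q = "museum" ∨ q = "unknown"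
  · rcases hq with h|h|h|h|h|h|h|h|h|h|h|h|h|h|h|h|h|h|h|h|h|h|h|h|h|h|h|h|h <;> subst h <;> rfl
  · push_neg at hq
    obtain ⟨h1,h2,h3,h4,h5,h6,h7,h8,h9,h10,h11,h12,h13,h14,h15,h16,h17,h18,h19,h20,h21,h22,h23,h24,h25,h26,h27,h28,h29⟩ := hq
    exact pv_core_eq_of_notMem q h1 h2 h3 h4 h5 h6 h7 h8 h9 h10 h11 h12 h13 h14 h15 h16 h17 h18 h19 h20 h21 h22 h23 h24 h25 h26 h27 h28 h29

-- ===== VERDICT (by name: the statement is the Claim_ definition above) =====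
theorem matching_buckets_spec : Claim_equal_matching_buckets := by
  intro qcat _
  unfold Spec_matching_buckets matching_buckets matching_buckets_alt
  exact pv_core_eq _
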